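-- pv_equiv track=rewrite | github.com/JulienGdnrBot/slimllm | slimllm/_sse.py | iter_events
-- ===== SOURCE A (Python) =====
-- from typing import Generator, Iterator, Optional, Tuple
--
-- def iter_events(
--     lines: Iterator[str],
-- ) -> Generator[Tuple[Optional[str], str], None, None]:
--     """
--     Parse SSE lines into (event_type, data) pairs.
--
--     Yields one tuple per complete SSE event (i.e. after the blank-line
--     separator).  The event_type is None when no "event:" field appeared.
--     """
--     event_type: Optional[str] = None
--     data_parts: list[str] = []
--
--     for line in lines:
--         if line.startswith("event:"):
--             event_type = line[len("event:"):].strip()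
--
--         elif line.startswith("data:"):
--             data_parts.append(line[len("data:"):].strip())
--
--         elif line == "":
--             # Blank line → dispatch the accumulated event
--             if data_parts:
--                 data = "\n".join(data_parts)
--                 yield event_type, data
--             # Reset for next event
--             event_type = None
--             data_parts = []
--
--         # Lines starting with ":" are SSE comments — ignore them.
--         # Unknown fields are silently ignored per the SSE spec.
--
--     # Flush any trailing event that wasn't terminated by a blank line
--     # (some providers close the connection without a final newline)
--     if data_parts:
--         data = "\n".join(data_parts)
--         yield event_type, data
-- ===== SOURCE B (Python) =====
-- def _parse_block(block):
--     event_type = None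
--     parts = []
--     for line in block:
--         if line.startswith("event:"):
--             event_type = line[len("event:"):].strip()
--         elif line.startswith("data:"):
--             parts.append(line[len("data:"):].strip())
--     if parts:
--         yield event_type, "\n".join(parts)
--
--
-- def iter_events(lines):
--     block = []
--     for line in lines:
--         if line == "":
--             yield from _parse_block(block)
--             block = []
--         else:
--             block.append(line)
--     yield from _parse_block(block)
-- ===== Notes on version B (the rewrite author's own statement) =====
-- stated objective: alternative
-- what changed: B splits the stream into blank-line-separated blocks and hands each block to a separate parser helper, replacing A's single loop that interleaves field parsing with dispatch state.
import Mathlib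
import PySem

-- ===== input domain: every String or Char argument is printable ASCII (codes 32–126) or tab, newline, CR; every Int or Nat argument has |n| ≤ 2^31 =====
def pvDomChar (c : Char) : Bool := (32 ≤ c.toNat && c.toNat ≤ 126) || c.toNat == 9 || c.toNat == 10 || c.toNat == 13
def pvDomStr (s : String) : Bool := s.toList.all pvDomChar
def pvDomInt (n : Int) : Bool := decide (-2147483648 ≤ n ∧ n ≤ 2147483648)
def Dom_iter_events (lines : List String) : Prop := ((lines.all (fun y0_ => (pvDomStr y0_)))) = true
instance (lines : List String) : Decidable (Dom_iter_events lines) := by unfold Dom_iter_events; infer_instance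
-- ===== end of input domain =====

-- B replaces A's single three-state loop by accumulate-blocks-then-parse-each-block (objective: alternative decomposition; return value only, both are generators in Python).

-- ===== PORT A =====
-- A: one fold carrying (event_type, data_parts, yielded output), dispatching on blank lines, plus a trailing flush.
def iter_events (lines : List String) : List (Option String × String) :=
  let st := lines.foldl
    (fun (st : Option String × List String × List (Option String × String)) line =>
      let et := st.1; let parts := st.2.1; let out := st.2.2
      if PySem.Str.startswith line "event:" then
        (some (PySem.Str.strip (PySem.Str.slice line (some 6) none)), parts, out)
      else if PySem.Str.startswith line "data:" then
        (et, parts ++ [PySem.Str.strip (PySem.Str.slice line (some 5) none)], out)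
      else if line == "" then
        (none, [],
          if parts = [] then out else out ++ [(et, PySem.Str.join "\n" parts)])
      else st)
    (none, [], [])
  if st.2.1 = [] then st.2.2 else st.2.2 ++ [(st.1, PySem.Str.join "\n" st.2.1)]

-- ===== PORT B =====
-- B helper: parse one block (the lines between blank separators) into zero or one event.
def parseBlock (block : List String) : List (Option String × String) :=
  let st := block.foldl
    (fun (st : Option String × List String) line =>
      if PySem.Str.startswith line "event:" then
        (some (PySem.Str.strip (PySem.Str.slice line (some 6) none)), st.2)
      else if PySem.Str.startswith line "data:" then
        (st.1, st.2 ++ [PySem.Str.strip (PySem.Str.slice line (some 5) none)])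
      else st)
    (none, [])
  if st.2 = [] then [] else [(st.1, PySem.Str.join "\n" st.2)]

def iter_events_alt (lines : List String) : List (Option String × String) :=
  let st := lines.foldl
    (fun (st : List String × List (Option String × String)) line =>
      if line == "" then ([], st.2 ++ parseBlock st.1)
      else (st.1 ++ [line], st.2))
    ([], [])
  st.2 ++ parseBlock st.1

-- ===== PRECONDITION & SPEC =====
def Spec_iter_events (lines : List String) (out : List (Option String × String)) : Prop := out = iter_events_alt lines
instance (lines : List String) (out : List (Option String × String)) : Decidable (Spec_iter_events lines out) := by unfold Spec_iter_events; infer_instance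

-- ===== CLAIM (what is proved, stated in full; the proofs are below) =====
def Claim_equal_iter_events : Prop := ∀ (lines : List String), Dom_iter_events lines → Spec_iter_events lines (iter_events lines)

-- ===== LEMMAS AND PROOFS =====

-- the per-line step functions, named for the proofs
def stepA (st : Option String × List String × List (Option String × String)) (line : String) :
    Option String × List String × List (Option String × String) :=
  if PySem.Str.startswith line "event:" then
    (some (PySem.Str.strip (PySem.Str.slice line (some 6) none)), st.2.1, st.2.2)
  else if PySem.Str.startswith line "data:" then
    (st.1, st.2.1 ++ [PySem.Str.strip (PySem.Str.slice line (some 5) none)], st.2.2)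
  else if line == "" then
    (none, [], if st.2.1 = [] then st.2.2 else st.2.2 ++ [(st.1, PySem.Str.join "\n" st.2.1)])
  else st

def stepBlock (st : Option String × List String) (line : String) : Option String × List String :=
  if PySem.Str.startswith line "event:" then
    (some (PySem.Str.strip (PySem.Str.slice line (some 6) none)), st.2)
  else if PySem.Str.startswith line "data:" then
    (st.1, st.2 ++ [PySem.Str.strip (PySem.Str.slice line (some 5) none)])
  else st

def stepB (st : List String × List (Option String × String)) (line : String) :
    List String × List (Option String × String) :=
  if line == "" then ([], st.2 ++ parseBlock st.1) else (st.1 ++ [line], st.2)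

theorem parseBlock_eq (block : List String) :
    parseBlock block =
      (fun st : Option String × List String =>
        if st.2 = [] then [] else [(st.1, PySem.Str.join "\n" st.2)])
      (block.foldl stepBlock (none, [])) := rfl

-- invariant: if the block fold state matches A's (event_type, parts), the two folds agree from then on
theorem main_inv (lines : List String) :
    ∀ (block : List String) (out : List (Option String × String)),
      (fun sa => if sa.2.1 = [] then sa.2.2 else sa.2.2 ++ [(sa.1, PySem.Str.join "\n" sa.2.1)])
        (lines.foldl stepA ((block.foldl stepBlock (none, [])).1,
                            (block.foldl stepBlock (none, [])).2, out)) =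
      (fun sb => sb.2 ++ parseBlock sb.1) (lines.foldl stepB (block, out)) := by
  induction lines with
  | nil =>
    intro block out
    simp only [List.foldl_nil, parseBlock_eq]
    rcases h : (block.foldl stepBlock (none, [])) with ⟨et, parts⟩
    by_cases hp : parts = [] <;> simp [hp]
  | cons line rest ih =>
    intro block out
    by_cases hb : line = ""
    · subst hb
      have h1 : stepA ((block.foldl stepBlock (none, ([] : List String))).1,
          (block.foldl stepBlock (none, [])).2, out)
          "" = (none, [], out ++ parseBlock block) := by
        rw [parseBlock_eq]
        rcases h : (block.foldl stepBlock (none, [])) with ⟨et, parts⟩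
        by_cases hp : parts = [] <;> simp [stepA, hp, PySem.Chars.startswith]
      have h2 : stepB (block, out) "" = ([], out ++ parseBlock block) := by
        simp [stepB]
      simp only [List.foldl_cons, h1, h2]
      have := ih [] (out ++ parseBlock block)
      simpa [stepBlock] using this
    · have h2 : stepB (block, out) line = (block ++ [line], out) := by
        simp [stepB, hb]
      have h1 : stepA ((block.foldl stepBlock (none, ([] : List String))).1,
          (block.foldl stepBlock (none, [])).2, out) line =
          (((block ++ [line]).foldl stepBlock (none, [])).1,
           ((block ++ [line]).foldl stepBlock (none, [])).2, out) := by
        simp only [List.foldl_append, List.foldl_cons, List.foldl_nil]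
        rcases h : (block.foldl stepBlock (none, [])) with ⟨et, parts⟩
        have hne : (line == "") = false := by simp [hb]
        simp only [stepA, stepBlock, hne]
        split_ifs <;> simp_all
      simp only [List.foldl_cons, h1, h2]
      exact ih (block ++ [line]) out

theorem fold_eq_stepA (lines : List String) (st : Option String × List String × List (Option String × String)) :
    lines.foldl
      (fun (st : Option String × List String × List (Option String × String)) line =>
        let et := st.1; let parts := st.2.1; let out := st.2.2
        if PySem.Str.startswith line "event:" then
          (some (PySem.Str.strip (PySem.Str.slice line (some 6) none)), parts, out)
        else if PySem.Str.startswith line "data:" then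
          (et, parts ++ [PySem.Str.strip (PySem.Str.slice line (some 5) none)], out)
        else if line == "" then
          (none, [], if parts = [] then out else out ++ [(et, PySem.Str.join "\n" parts)])
        else st) st
    = lines.foldl stepA st := by
  rfl

theorem fold_eq_stepB (lines : List String) (st : List String × List (Option String × String)) :
    lines.foldl
      (fun (st : List String × List (Option String × String)) line =>
        if line == "" then ([], st.2 ++ parseBlock st.1)
        else (st.1 ++ [line], st.2)) st
    = lines.foldl stepB st := by
  rfl

-- ===== VERDICT (by name: the statement is the Claim_ definition above) =====
theorem iter_events_spec : Claim_equal_iter_events := by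
  intro lines _
  show iter_events lines = iter_events_alt lines
  unfold iter_events iter_events_alt
  rw [fold_eq_stepA, fold_eq_stepB]
  have := main_inv lines [] []
  simpa [stepBlock] using this
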